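-- pv_equiv track=rewrite | github.com/konstantyg/aoc | 2024/22/solution.py | process
-- ===== SOURCE A (Python) =====
-- from collections import deque, Counter
--
-- def calc(secret: int) -> int:
--     secret = ((secret << 6) ^ secret) & 16777215
--     secret = ((secret >> 5) ^ secret) & 16777215
--     secret = ((secret << 11) ^ secret) & 16777215
--     return secret
--
-- def process(secrets: list[int], generations: int = 2000) -> int:
--     sum_secrets = 0
--     sequences = Counter()
--     for secret in secrets:
--         changes = deque(maxlen=4)
--         occurences = set()
--         last_price = secret % 10
--         for _ in range(generations):
--             secret = calc(secret)
--             price = secret % 10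
--             changes.append(price - last_price)
--             last_price = price
--             if len(changes) == 4 and (occurence := tuple(changes)) not in occurences:
--                 occurences.add(occurence)
--                 sequences[occurence] += price
--         sum_secrets += secret
--     return sum_secrets, sequences.most_common(1)[0][1]
-- ===== SOURCE B (Python) =====
-- def calc(secret: int) -> int:
--     secret = ((secret << 6) ^ secret) & 16777215
--     secret = ((secret >> 5) ^ secret) & 16777215
--     secret = ((secret << 11) ^ secret) & 16777215
--     return secret
--
-- def process(secrets: list[int], generations: int = 2000) -> int:
--     sum_secrets = 0
--     counts = {}
--     for s0 in secrets:
--         # pass 1: table of secrets / prices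
--         vals = [s0]
--         for _ in range(generations):
--             vals.append(calc(vals[-1]))
--         sum_secrets += vals[-1]
--         prices = [v % 10 for v in vals]
--         diffs = [prices[i + 1] - prices[i] for i in range(len(prices) - 1)]
--         # pass 2: window scan by index, first occurrence per buyer
--         seen = set()
--         for i in range(len(diffs) - 3):
--             key = tuple(diffs[i:i + 4])
--             if key not in seen:
--                 seen.add(key)
--                 counts[key] = counts.get(key, 0) + prices[i + 4]
--     return sum_secrets, max(counts.values())
-- ===== Notes on version B (the rewrite author's own statement) =====
-- stated objective: alternative
-- what changed: Replaces A's single streaming inner loop (deque-of-4 window, Counter updated on the fly, most_common(1)) by two separate passes per buyer - first build the full secret/price table, then compute the difference list and scan 4-wide windows by index into it - and takes a plain max over the dict's values.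
-- outside the precondition, e.g. on process([1], 3): A raises IndexError, B raises ValueError; on process([], 10): A raises IndexError, B raises ValueError
import Mathlib
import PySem

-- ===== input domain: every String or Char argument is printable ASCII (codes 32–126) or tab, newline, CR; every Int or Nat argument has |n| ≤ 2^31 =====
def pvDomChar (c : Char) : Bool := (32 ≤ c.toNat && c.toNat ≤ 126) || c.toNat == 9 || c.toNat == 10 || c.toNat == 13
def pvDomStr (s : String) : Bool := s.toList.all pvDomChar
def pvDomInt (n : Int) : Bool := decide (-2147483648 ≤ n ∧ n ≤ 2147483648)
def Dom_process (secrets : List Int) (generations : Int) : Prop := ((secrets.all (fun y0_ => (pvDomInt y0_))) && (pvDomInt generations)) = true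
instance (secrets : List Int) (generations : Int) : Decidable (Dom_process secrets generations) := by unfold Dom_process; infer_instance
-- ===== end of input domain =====

-- B replaces A's single streaming loop (deque window + Counter + most_common) by two passes per
-- buyer — build the secret/price table, then an index-based window scan — and a plain max of the
-- dict values; objective: alternative decomposition, same asymptotic cost.

-- ===== PORT A =====
-- helper calc (shared by both Pythons)
def calcStep (secret : Int) : Int :=
  let s1 := PySem.Int.band (PySem.Int.bxor (secret <<< (6:Nat)) secret) 16777215
  let s2 := PySem.Int.band (PySem.Int.bxor (s1 >>> (5:Nat)) s1) 16777215
  PySem.Int.band (PySem.Int.bxor (s2 <<< (11:Nat)) s2) 16777215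

-- one iteration of A's inner 'for _ in range(generations)' loop body
def stepA (st : Int × List Int × PySem.Set (List Int) × Int × PySem.Dict (List Int) Int) :
    Int × List Int × PySem.Set (List Int) × Int × PySem.Dict (List Int) Int :=
  let (secret, changes, occurences, lastPrice, sequences) := st
  let secret := calcStep secret
  let price := PySem.Int.mod secret 10
  -- deque(maxlen=4).append ported by hand: drop the leftmost element when already full (exact)
  let changes := if changes.length == 4 then changes.drop 1 ++ [price - lastPrice]
                 else changes ++ [price - lastPrice]
  if changes.length == 4 && !(PySem.Set.contains occurences changes) then
    -- sequences[occurence] += price: a Counter update, ported as Dict.modify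
    (secret, changes, PySem.Set.add occurences changes, price,
      sequences.modify changes 0 (· + price))
  else (secret, changes, occurences, price, sequences)

-- A's outer loop body: one buyer
def buyerA (generations : Int) (st : Int × PySem.Dict (List Int) Int) (secret0 : Int) :
    Int × PySem.Dict (List Int) Int :=
  let inner := (PySem.List.pyRange 0 generations 1).foldl (fun s _ => stepA s)
    (secret0, ([] : List Int), (PySem.Set.empty : PySem.Set (List Int)),
      PySem.Int.mod secret0 10, st.2)
  (st.1 + inner.1, inner.2.2.2.2)

def process (secrets : List Int) (generations : Int) : Int × Int :=
  let res := secrets.foldl (buyerA generations) (0, PySem.Dict.empty)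
  -- most_common(1)[0][1]: heapq.nlargest(1, items, key=count)[0] = first max-count item
  match PySem.List.max? res.2.items (fun p => p.2) with
  | none => (res.1, 0)      -- IndexError in Python, excluded by Pre_process
  | some p => (res.1, p.2)

-- ===== PORT B =====
-- pass 1 step: s = calc(s); vals.append(s)
def stepVals (sv : Int × List Int) : Int × List Int :=
  (calcStep sv.1, sv.2 ++ [calcStep sv.1])

-- pass 2 step: window at index i, first occurrence per buyer
def stepWin (prices diffs : List Int)
    (sc : PySem.Set (List Int) × PySem.Dict (List Int) Int) (i : Int) :
    PySem.Set (List Int) × PySem.Dict (List Int) Int :=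
  let key := PySem.List.slice diffs (some i) (some (i + 4))
  if PySem.Set.contains sc.1 key then sc
  else (PySem.Set.add sc.1 key,
        -- counts[key] = counts.get(key, 0) + prices[i+4], ported as Dict.modify
        sc.2.modify key 0 (· + PySem.List.pyGetD prices (i + 4) 0))

-- B's outer loop body: one buyer, table pass then window pass
def buyerB (generations : Int) (st : Int × PySem.Dict (List Int) Int) (s0 : Int) :
    Int × PySem.Dict (List Int) Int :=
  let sv := (PySem.List.pyRange 0 generations 1).foldl (fun sv _ => stepVals sv) (s0, [s0])
  let prices := sv.2.map (fun v => PySem.Int.mod v 10)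
  let diffs := (PySem.List.pyRange 0 ((prices.length : Int) - 1) 1).map
    (fun i => PySem.List.pyGetD prices (i + 1) 0 - PySem.List.pyGetD prices i 0)
  let scan := (PySem.List.pyRange 0 ((diffs.length : Int) - 3) 1).foldl
    (stepWin prices diffs) ((PySem.Set.empty : PySem.Set (List Int)), st.2)
  (st.1 + sv.1, scan.2)

def process_alt (secrets : List Int) (generations : Int) : Int × Int :=
  let res := secrets.foldl (buyerB generations) (0, PySem.Dict.empty)
  match PySem.List.max? res.2.values (fun v => v) with
  | some v => (res.1, v)
  | none => (res.1, 0)      -- ValueError in Python (max of empty), excluded by Pre_process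

-- ===== PRECONDITION & SPEC =====
-- Pre_ excludes exactly the inputs on which A raises IndexError (most_common(1)[0] of an empty
-- Counter): empty buyer list, or fewer than 4 generations so no 4-change window ever forms.
def Pre_process (secrets : List Int) (generations : Int) : Prop :=
  secrets ≠ [] ∧ 4 ≤ generations
instance (secrets : List Int) (generations : Int) : Decidable (Pre_process secrets generations) := by
  unfold Pre_process; infer_instance

def pvWitness_process : List Int × Int := ([123], 10)

def Spec_process (secrets : List Int) (generations : Int) (out : Int × Int) : Prop := out = process_alt secrets generations
instance (secrets : List Int) (generations : Int) (out : Int × Int) : Decidable (Spec_process secrets generations out) := by unfold Spec_process; infer_instance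

-- ===== CLAIM (what is proved, stated in full; the proofs are below) =====
def Claim_equal_process : Prop := ∀ (secrets : List Int) (generations : Int), Dom_process secrets generations → Pre_process secrets generations → Spec_process secrets generations (process secrets generations)

-- ===== LEMMAS AND PROOFS =====

-- the common indexed model of one buyer
def itS (s0 : Int) : Nat → Int
  | 0 => s0
  | n + 1 => calcStep (itS s0 n)

def prS (s0 : Int) (n : Nat) : Int := PySem.Int.mod (itS s0 n) 10

def dfS (s0 : Int) (n : Nat) : Int := prS s0 (n + 1) - prS s0 n

def winS (s0 : Int) (i : Nat) : List Int :=
  [dfS s0 i, dfS s0 (i + 1), dfS s0 (i + 2), dfS s0 (i + 3)]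

def updS (key : List Int) (p : Int)
    (sc : PySem.Set (List Int) × PySem.Dict (List Int) Int) :
    PySem.Set (List Int) × PySem.Dict (List Int) Int :=
  if PySem.Set.contains sc.1 key then sc
  else (PySem.Set.add sc.1 key, sc.2.modify key 0 (· + p))

def scanS (s0 : Int) (m : Nat)
    (sc : PySem.Set (List Int) × PySem.Dict (List Int) Int) :
    PySem.Set (List Int) × PySem.Dict (List Int) Int :=
  (List.range m).foldl (fun sc i => updS (winS s0 i) (prS s0 (i + 4)) sc) sc

def chgL (s0 : Int) (n : Nat) : List Int := ((List.range n).map (dfS s0)).drop (n - 4)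

def modelBuyer (generations : Int) (st : Int × PySem.Dict (List Int) Int) (s0 : Int) :
    Int × PySem.Dict (List Int) Int :=
  (st.1 + itS s0 generations.toNat,
   (scanS s0 (generations.toNat - 3) (PySem.Set.empty, st.2)).2)

lemma pyRange_zero_toNat (g : Int) :
    PySem.List.pyRange 0 g 1 = (List.range g.toNat).map (fun k : Nat => (k : Int)) := by
  by_cases h : 0 ≤ g
  · obtain ⟨n, rfl⟩ := Int.eq_ofNat_of_zero_le h
    rw [Int.toNat_natCast]
    exact PySem.List.pyRange_zero_natCast n
  · rw [Int.toNat_of_nonpos (by omega)]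
    simp [PySem.List.pyRange]; omega

lemma chgL_len (s0 : Int) (n : Nat) : (chgL s0 n).length = min n 4 := by
  simp [chgL]; omega

lemma chgL_succ_small (s0 : Int) (n : Nat) (h : n ≤ 3) :
    chgL s0 n ++ [dfS s0 n] = chgL s0 (n + 1) := by
  unfold chgL
  rw [Nat.sub_eq_zero_of_le (by omega), Nat.sub_eq_zero_of_le (by omega)]
  simp [List.range_succ]

lemma chgL_succ_big (s0 : Int) (n : Nat) (h : 4 ≤ n) :
    (chgL s0 n).drop 1 ++ [dfS s0 n] = chgL s0 (n + 1) := by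
  unfold chgL
  rw [List.drop_drop, List.range_succ, List.map_append,
    List.drop_append_of_le_length (by simp)]
  congr 2
  omega

lemma chgL_eq_winS (s0 : Int) (i : Nat) : chgL s0 (i + 4) = winS s0 i := by
  unfold chgL winS
  rw [Nat.add_sub_cancel, List.range_add, List.map_append,
    List.drop_append_of_le_length (by simp)]
  simp [List.range_succ, List.drop_of_length_le]

lemma scanS_succ (s0 : Int) (m : Nat) (sc : PySem.Set (List Int) × PySem.Dict (List Int) Int) :
    scanS s0 (m + 1) sc = updS (winS s0 m) (prS s0 (m + 4)) (scanS s0 m sc) := by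
  simp [scanS, List.range_succ]

lemma stepA_small (s0 : Int) (n : Nat) (h : n < 3) (occ : PySem.Set (List Int))
    (seq : PySem.Dict (List Int) Int) :
    stepA (itS s0 n, chgL s0 n, occ, prS s0 n, seq)
      = (itS s0 (n + 1), chgL s0 (n + 1), occ, prS s0 (n + 1), seq) := by
  simp only [stepA]
  rw [show PySem.Int.mod (calcStep (itS s0 n)) 10 = prS s0 (n + 1) from rfl]
  rw [show prS s0 (n + 1) - prS s0 n = dfS s0 n from rfl]
  rw [show ((chgL s0 n).length == 4) = false by rw [chgL_len]; simp; omega]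
  simp only [Bool.false_eq_true, if_false]
  rw [chgL_succ_small s0 n (by omega)]
  rw [show ((chgL s0 (n + 1)).length == 4) = false by rw [chgL_len]; simp; omega]
  simp [itS]

lemma stepA_big (s0 : Int) (n : Nat) (h : 3 ≤ n) (occ : PySem.Set (List Int))
    (seq : PySem.Dict (List Int) Int) :
    stepA (itS s0 n, chgL s0 n, occ, prS s0 n, seq)
      = (itS s0 (n + 1), chgL s0 (n + 1),
         (updS (winS s0 (n - 3)) (prS s0 (n + 1)) (occ, seq)).1, prS s0 (n + 1),
         (updS (winS s0 (n - 3)) (prS s0 (n + 1)) (occ, seq)).2) := by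
  simp only [stepA]
  rw [show PySem.Int.mod (calcStep (itS s0 n)) 10 = prS s0 (n + 1) from rfl]
  rw [show prS s0 (n + 1) - prS s0 n = dfS s0 n from rfl]
  have hwin : chgL s0 (n + 1) = winS s0 (n - 3) := by
    rw [show n + 1 = (n - 3) + 4 by omega]; exact chgL_eq_winS s0 (n - 3)
  by_cases h4 : 4 ≤ n
  · rw [show ((chgL s0 n).length == 4) = true by rw [chgL_len]; simp; omega]
    simp only [if_true]
    rw [chgL_succ_big s0 n h4]
    rw [show ((chgL s0 (n + 1)).length == 4) = true by rw [chgL_len]; simp; omega]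
    simp only [Bool.true_and, updS, hwin]
    by_cases hc : winS s0 (n - 3) ∈ occ <;> simp [hc, itS]
  · have h3 : n = 3 := by omega
    subst h3
    rw [show ((chgL s0 3).length == 4) = false by rw [chgL_len]; simp]
    simp only [Bool.false_eq_true, if_false]
    rw [chgL_succ_small s0 3 (by omega)]
    rw [show ((chgL s0 (3 + 1)).length == 4) = true by rw [chgL_len]; simp]
    simp only [Bool.true_and, updS, hwin]
    by_cases hc : winS s0 0 ∈ occ <;> simp [hc, itS]

lemma innerA_char (s0 : Int) (seq : PySem.Dict (List Int) Int) (n : Nat) :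
    (List.range n).foldl (fun s _ => stepA s)
      (s0, ([] : List Int), (PySem.Set.empty : PySem.Set (List Int)), PySem.Int.mod s0 10, seq)
    = (itS s0 n, chgL s0 n, (scanS s0 (n - 3) (PySem.Set.empty, seq)).1, prS s0 n,
       (scanS s0 (n - 3) (PySem.Set.empty, seq)).2) := by
  induction n with
  | zero => simp [itS, prS, chgL, scanS]
  | succ n ih =>
    rw [List.range_succ, List.foldl_append, ih]
    simp only [List.foldl_cons, List.foldl_nil]
    by_cases h3 : 3 ≤ n
    · rw [stepA_big s0 n h3]
      rw [show n + 1 - 3 = (n - 3) + 1 by omega, scanS_succ]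
      rw [show (n - 3) + 4 = n + 1 by omega]
    · rw [stepA_small s0 n (by omega)]
      rw [show n + 1 - 3 = 0 by omega, show n - 3 = 0 by omega]

lemma buyerA_eq_model (generations : Int) :
    buyerA generations = modelBuyer generations := by
  funext st s0
  unfold buyerA modelBuyer
  rw [pyRange_zero_toNat, List.foldl_map, innerA_char]

lemma vals_char (s0 : Int) (n : Nat) :
    (List.range n).foldl (fun sv _ => stepVals sv) (s0, [s0])
    = (itS s0 n, (List.range (n + 1)).map (itS s0)) := by
  induction n with
  | zero => simp [itS, List.range_succ]
  | succ n ih =>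
    rw [List.range_succ, List.foldl_append, ih]
    simp [stepVals, List.range_succ, itS]

lemma window_take (f : Nat → Int) (n k : Nat) (h : k + 4 ≤ n) :
    (((List.range n).map f).drop k).take 4 = [f k, f (k + 1), f (k + 2), f (k + 3)] := by
  rw [show n = (k+4) + (n - (k+4)) by omega, List.range_add, List.map_append,
    List.drop_append_of_le_length (by simp),
    List.take_append_of_le_length (by simp)]
  rw [show k + 4 = k + 4 from rfl, List.range_add, List.map_append,
    List.drop_append_of_le_length (by simp)]
  simp [List.range_succ, List.drop_of_length_le, List.take_of_length_le]

lemma buyerB_eq_model (generations : Int) :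
    buyerB generations = modelBuyer generations := by
  funext st s0
  simp only [buyerB, modelBuyer]
  rw [pyRange_zero_toNat, List.foldl_map, vals_char]
  generalize generations.toNat = N
  have hpr : (List.map (fun v => PySem.Int.mod v 10) ((List.range (N + 1)).map (itS s0)))
      = (List.range (N + 1)).map (prS s0) := by
    rw [List.map_map]; rfl
  rw [hpr]
  simp only [List.length_map, List.length_range]
  rw [show (((N + 1 : Nat) : Int) - 1) = (N : Int) by push_cast; ring]
  rw [pyRange_zero_toNat, Int.toNat_natCast, List.map_map]
  have hdiff : (List.range N).map
        ((fun i => PySem.List.pyGetD ((List.range (N + 1)).map (prS s0)) (i + 1) 0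
          - PySem.List.pyGetD ((List.range (N + 1)).map (prS s0)) i 0) ∘ (fun k : Nat => (k : Int)))
      = (List.range N).map (dfS s0) := by
    apply List.map_congr_left
    intro k hk
    rw [List.mem_range] at hk
    show PySem.List.pyGetD ((List.range (N + 1)).map (prS s0)) ((k : Int) + 1) 0
        - PySem.List.pyGetD ((List.range (N + 1)).map (prS s0)) (k : Int) 0 = dfS s0 k
    rw [show ((k : Int) + 1) = (((k + 1 : Nat)) : Int) by push_cast; ring]
    rw [PySem.List.pyGetD_natCast, PySem.List.pyGetD_natCast]
    rw [PySem.List.getD_map_range _ _ _ _ (by omega),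
        PySem.List.getD_map_range _ _ _ _ (by omega)]
    rfl
  rw [hdiff]
  simp only [List.length_map, List.length_range]
  rw [pyRange_zero_toNat, show (((N : Int) - 3)).toNat = N - 3 by omega, List.foldl_map]
  simp only [Prod.mk.injEq]
  refine ⟨trivial, ?_⟩
  unfold scanS
  refine congrArg Prod.snd (PySem.List.foldl_congr_mem _ _ _ _ ?_)
  intro acc k hk
  rw [List.mem_range] at hk
  show stepWin ((List.range (N + 1)).map (prS s0)) ((List.range N).map (dfS s0)) acc (k : Int)
      = updS (winS s0 k) (prS s0 (k + 4)) acc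
  unfold stepWin updS
  rw [show ((k : Int) + 4) = (((k + 4 : Nat)) : Int) by push_cast; ring]
  rw [PySem.List.slice_natCast, Nat.add_sub_cancel_left,
    window_take (dfS s0) N k (by omega), PySem.List.pyGetD_natCast,
    PySem.List.getD_map_range _ _ _ _ (by omega)]
  rfl

lemma max?_snd_of_items (d : PySem.Dict (List Int) Int) :
    (match PySem.List.max? d.items (fun p => p.2) with
      | none => (0 : Int)
      | some p => p.2)
    = (match PySem.List.max? d.values (fun v => v) with
      | some v => v
      | none => (0 : Int)) := by
  cases hA : PySem.List.max? d.items (fun p => p.2) with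
  | none =>
    rw [PySem.List.max?_eq_none_iff] at hA
    have hv : d.values = [] := by simp [PySem.Dict.values, hA]
    rw [hv]
    simp [PySem.List.max?]
  | some p =>
    have hpmem := PySem.List.max?_mem hA
    have hge := PySem.List.max?_isMax hA
    obtain ⟨v, hv⟩ : ∃ v, PySem.List.max? d.values (fun v => v) = some v := by
      cases hmax : PySem.List.max? d.values (fun v => v) with
      | none =>
        rw [PySem.List.max?_eq_none_iff] at hmax
        have hmem : p.2 ∈ d.values := by
          simp only [PySem.Dict.values]
          exact List.mem_map_of_mem hpmem
        rw [hmax] at hmem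
        exact absurd hmem List.not_mem_nil
      | some v => exact ⟨v, rfl⟩
    rw [hv]
    have h1 : p.2 ≤ v := by
      refine PySem.List.max?_isMax hv p.2 ?_
      simp only [PySem.Dict.values]
      exact List.mem_map_of_mem hpmem
    have h2 : v ≤ p.2 := by
      have hvm := PySem.List.max?_mem hv
      simp only [PySem.Dict.values] at hvm
      obtain ⟨q, hq, rfl⟩ := List.mem_map.mp hvm
      exact hge q hq
    simp only []
    omega

-- ===== VERDICT (by name: the statement is the Claim_ definition above) =====
theorem process_spec : Claim_equal_process := by
  intro secrets generations _ _
  unfold Spec_process process process_alt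
  rw [buyerA_eq_model, buyerB_eq_model]
  have h := max?_snd_of_items
    (List.foldl (modelBuyer generations) ((0 : Int), PySem.Dict.empty) secrets).2
  revert h
  split <;> split <;> intro h <;> simp_all [PySem.List.max?]
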